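-- pv_equiv track=rewrite | github.com/CherryResearch/float | backend/app/sae/steer.py | resolve_token_positions
-- ===== SOURCE A (Python) =====
-- def resolve_token_positions(token_positions: str, seq_len: int) -> list[int]:
--     mode = token_positions.strip().lower()
--     if mode == "all":
--         return list(range(seq_len))
--     if mode == "last":
--         return [seq_len - 1] if seq_len > 0 else []
--
--     positions: list[int] = []
--     for chunk in mode.split(","):
--         chunk = chunk.strip()
--         if not chunk:
--             continue
--         index = int(chunk)
--         if index < 0:
--             index = seq_len + index
--         if 0 <= index < seq_len:
--             positions.append(index)
--     return sorted(set(positions))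
-- ===== SOURCE B (Python) =====
-- def _position(chunk: str, seq_len: int):
--     """Normalize one comma chunk to a valid index, or None if it selects nothing."""
--     chunk = chunk.strip()
--     if not chunk:
--         return None
--     index = int(chunk)
--     if index < 0:
--         index = seq_len + index
--     return index if 0 <= index < seq_len else None
--
--
-- def _insert_sorted_unique(out: list[int], x: int) -> list[int]:
--     """Insert x into the sorted duplicate-free list out, keeping it sorted and duplicate-free."""
--     i = 0
--     while i < len(out) and out[i] < x:
--         i += 1
--     if i < len(out) and out[i] == x:
--         return out
--     return out[:i] + [x] + out[i:]
--
--
-- def resolve_token_positions(token_positions: str, seq_len: int) -> list[int]: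
--     mode = token_positions.strip().lower()
--     if mode == "all":
--         return list(range(seq_len))
--     if mode == "last":
--         return [seq_len - 1] if seq_len > 0 else []
--     out: list[int] = []
--     for chunk in mode.split(","):
--         index = _position(chunk, seq_len)
--         if index is not None:
--             out = _insert_sorted_unique(out, index)
--     return out
-- ===== Notes on version B (the rewrite author's own statement) =====
-- stated objective: alternative
-- what changed: B replaces A's collect-then-sorted(set(...)) postprocessing with a single pass that maintains a sorted duplicate-free output list via ordered insertion, so no set and no final sort are ever built.
import Mathlib
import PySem

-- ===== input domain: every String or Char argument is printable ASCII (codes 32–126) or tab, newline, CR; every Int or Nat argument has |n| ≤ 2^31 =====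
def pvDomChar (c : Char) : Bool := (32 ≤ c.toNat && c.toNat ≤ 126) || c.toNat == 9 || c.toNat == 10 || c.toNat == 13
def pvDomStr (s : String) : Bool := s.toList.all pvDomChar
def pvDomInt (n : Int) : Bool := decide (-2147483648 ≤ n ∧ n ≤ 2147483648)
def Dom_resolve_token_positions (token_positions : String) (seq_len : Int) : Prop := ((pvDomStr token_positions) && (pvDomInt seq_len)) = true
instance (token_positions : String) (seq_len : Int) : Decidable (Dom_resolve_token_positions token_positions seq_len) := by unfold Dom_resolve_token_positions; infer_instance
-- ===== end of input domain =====

-- B keeps A's guard branches but replaces A's append-then-sorted(set(...)) with ordered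
-- duplicate-free insertion into the output list; alternative algorithm, same return value on Pre_.

-- ===== PORT A =====
-- A's per-chunk loop body (append the normalized in-range index)
def pvStepA (seq_len : Int) (pos : List Int) (chunk : String) : List Int :=
  if PySem.Str.strip chunk = "" then pos
  else match PySem.Int.ofStr? (PySem.Str.strip chunk) with
    | none => pos          -- int(chunk) raises ValueError here; excluded by Pre_
    | some index0 =>
      let index := if index0 < 0 then seq_len + index0 else index0
      if 0 ≤ index ∧ index < seq_len then pos ++ [index] else pos

def resolve_token_positions (token_positions : String) (seq_len : Int) : List Int :=
  let mode := PySem.Str.lower (PySem.Str.strip token_positions)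
  if mode = "all" then PySem.List.pyRange 0 seq_len 1
  else if mode = "last" then (if seq_len > 0 then [seq_len - 1] else [])
  else
    let positions := ((PySem.Str.split? mode ",").getD []).foldl (pvStepA seq_len) []
    PySem.List.sorted (PySem.Set.ofList positions) (fun x => x) false

-- ===== PORT B =====
-- B's helper _position: one chunk → its valid normalized index, or none
def pvPosition? (chunk : String) (seq_len : Int) : Option Int :=
  if PySem.Str.strip chunk = "" then none
  else match PySem.Int.ofStr? (PySem.Str.strip chunk) with
    | none => none         -- int(chunk) raises ValueError here; excluded by Pre_
    | some index0 =>
      let index := if index0 < 0 then seq_len + index0 else index0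
      if 0 ≤ index ∧ index < seq_len then some index else none

-- B's helper _insert_sorted_unique: walk past elements < x, skip if present, insert before the first ≥ x
def pvIns (x : Int) : List Int → List Int
  | [] => [x]
  | y :: ys => if y < x then y :: pvIns x ys else if y = x then y :: ys else x :: y :: ys

def pvStepB (seq_len : Int) (out : List Int) (chunk : String) : List Int :=
  match pvPosition? chunk seq_len with
  | none => out
  | some index => pvIns index out

def resolve_token_positions_alt (token_positions : String) (seq_len : Int) : List Int :=
  let mode := PySem.Str.lower (PySem.Str.strip token_positions)
  if mode = "all" then PySem.List.pyRange 0 seq_len 1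
  else if mode = "last" then (if seq_len > 0 then [seq_len - 1] else [])
  else ((PySem.Str.split? mode ",").getD []).foldl (pvStepB seq_len) []

-- ===== PRECONDITION & SPEC =====
-- Pre_ excludes exactly the inputs on which Python A raises ValueError: a non-"all"/"last" spec
-- containing a non-empty comma chunk that is not an int literal (B raises there too).
def Pre_resolve_token_positions (token_positions : String) (seq_len : Int) : Prop :=
  PySem.Str.lower (PySem.Str.strip token_positions) = "all" ∨
  PySem.Str.lower (PySem.Str.strip token_positions) = "last" ∨
  ∀ chunk ∈ (PySem.Str.split? (PySem.Str.lower (PySem.Str.strip token_positions)) ",").getD [],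
    PySem.Str.strip chunk = "" ∨ (PySem.Int.ofStr? (PySem.Str.strip chunk)).isSome
instance (token_positions : String) (seq_len : Int) : Decidable (Pre_resolve_token_positions token_positions seq_len) := by unfold Pre_resolve_token_positions; infer_instance

def pvWitness_resolve_token_positions : String × Int := ("0, 2, -1", 4)

def Spec_resolve_token_positions (token_positions : String) (seq_len : Int) (out : List Int) : Prop := out = resolve_token_positions_alt token_positions seq_len
instance (token_positions : String) (seq_len : Int) (out : List Int) : Decidable (Spec_resolve_token_positions token_positions seq_len out) := by unfold Spec_resolve_token_positions; infer_instance

-- ===== CLAIM (what is proved, stated in full; the proofs are below) =====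
def Claim_equal_resolve_token_positions : Prop := ∀ (token_positions : String) (seq_len : Int), Dom_resolve_token_positions token_positions seq_len → Pre_resolve_token_positions token_positions seq_len → Spec_resolve_token_positions token_positions seq_len (resolve_token_positions token_positions seq_len)

-- ===== LEMMAS AND PROOFS =====

theorem mem_pvIns (x a : Int) (l : List Int) : a ∈ pvIns x l ↔ a = x ∨ a ∈ l := by
  induction l with
  | nil => simp [pvIns]
  | cons y ys ih =>
    by_cases h1 : y < x
    · simp only [pvIns, if_pos h1, List.mem_cons, ih]
      tauto
    · by_cases h2 : y = x
      · subst h2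
        simp [pvIns, h1, List.mem_cons]
      · simp only [pvIns, if_neg h1, if_neg h2, List.mem_cons]

theorem pvIns_pairwise (x : Int) (l : List Int) (h : l.Pairwise (· < ·)) :
    (pvIns x l).Pairwise (· < ·) := by
  induction l with
  | nil => simp [pvIns]
  | cons y ys ih =>
    rcases List.pairwise_cons.mp h with ⟨hy, hys⟩
    by_cases h1 : y < x
    · simp only [pvIns, if_pos h1]
      refine List.pairwise_cons.mpr ⟨?_, ih hys⟩
      intro a ha
      rcases (mem_pvIns x a ys).mp ha with rfl | ha
      · exact h1
      · exact hy a ha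
    · by_cases h2 : y = x
      · simpa [pvIns, h1, h2] using h
      · simp only [pvIns, if_neg h1, if_neg h2]
        refine List.pairwise_cons.mpr ⟨?_, h⟩
        intro a ha
        rcases List.mem_cons.mp ha with rfl | ha
        · omega
        · exact lt_trans (by omega) (hy a ha)

theorem pvIns_eq_self_of_mem (x : Int) (l : List Int) (h : l.Pairwise (· < ·)) (hx : x ∈ l) :
    pvIns x l = l := by
  induction l with
  | nil => simp at hx
  | cons y ys ih =>
    rcases List.pairwise_cons.mp h with ⟨hy, hys⟩
    rcases List.mem_cons.mp hx with rfl | hx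
    · simp [pvIns]
    · have h1 : y < x := hy x hx
      simp [pvIns, h1, ih hys hx]

theorem pvIns_perm_of_not_mem (x : Int) (l : List Int) (hx : x ∉ l) :
    (pvIns x l).Perm (x :: l) := by
  induction l with
  | nil => simp [pvIns]
  | cons y ys ih =>
    have hxy : ¬ y = x := fun h => hx (h ▸ List.mem_cons_self)
    by_cases h1 : y < x
    · simp only [pvIns, if_pos h1]
      have h2 := ih (fun h => hx (List.mem_cons_of_mem y h))
      exact (h2.cons y).trans (List.Perm.swap x y ys)
    · simp [pvIns, h1, hxy]

theorem setAdd_eq_of_mem (s : List Int) (x : Int) (hx : x ∈ s) : PySem.Set.add s x = s := by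
  simp [PySem.Set.add, hx]

theorem setAdd_eq_append_of_not_mem (s : List Int) (x : Int) (hx : x ∉ s) :
    PySem.Set.add s x = s ++ [x] := by
  simp [PySem.Set.add, hx]

theorem ofList_append_singleton (xs : List Int) (x : Int) :
    PySem.Set.ofList (xs ++ [x]) = PySem.Set.add (PySem.Set.ofList xs) x := by
  simp [PySem.Set.ofList_eq_foldl]

-- one inserted index preserves the loop invariant
theorem step_inv (i : Int) (accA accB : List Int)
    (hperm : accB.Perm (PySem.Set.ofList accA)) (hpw : accB.Pairwise (· < ·)) :
    (pvIns i accB).Perm (PySem.Set.ofList (accA ++ [i])) ∧ (pvIns i accB).Pairwise (· < ·) := by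
  refine ⟨?_, pvIns_pairwise i accB hpw⟩
  rw [ofList_append_singleton]
  by_cases hm : i ∈ accB
  · have hmA : i ∈ PySem.Set.ofList accA := hperm.mem_iff.mp hm
    rw [pvIns_eq_self_of_mem i accB hpw hm, setAdd_eq_of_mem _ _ hmA]
    exact hperm
  · have hmA : i ∉ PySem.Set.ofList accA := fun h => hm (hperm.mem_iff.mpr h)
    rw [setAdd_eq_append_of_not_mem _ _ hmA]
    exact (pvIns_perm_of_not_mem i accB hm).trans
      ((hperm.cons i).trans (List.perm_append_singleton i _).symm)

-- A's step equals B's step up to the invariant: case on what pvPosition? yields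
theorem stepA_eq (seq_len : Int) (pos : List Int) (chunk : String) :
    pvStepA seq_len pos chunk =
      match pvPosition? chunk seq_len with
      | none => pos
      | some index => pos ++ [index] := by
  unfold pvStepA pvPosition?
  by_cases hc : PySem.Str.strip chunk = ""
  · rw [if_pos hc, if_pos hc]
  · rw [if_neg hc, if_neg hc]
    cases PySem.Int.ofStr? (PySem.Str.strip chunk) with
    | none => rfl
    | some index0 =>
      by_cases hr : 0 ≤ (if index0 < 0 then seq_len + index0 else index0) ∧
          (if index0 < 0 then seq_len + index0 else index0) < seq_len
      · simp only [if_pos hr]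
      · simp only [if_neg hr]

-- the two chunk loops, related by the invariant
theorem loop_inv (seq_len : Int) (chunks : List String) (accA accB : List Int)
    (hperm : accB.Perm (PySem.Set.ofList accA)) (hpw : accB.Pairwise (· < ·)) :
    (chunks.foldl (pvStepB seq_len) accB).Perm
        (PySem.Set.ofList (chunks.foldl (pvStepA seq_len) accA)) ∧
      (chunks.foldl (pvStepB seq_len) accB).Pairwise (· < ·) := by
  induction chunks generalizing accA accB with
  | nil => exact ⟨hperm, hpw⟩
  | cons chunk rest ih =>
    simp only [List.foldl_cons, pvStepB, stepA_eq]
    cases pvPosition? chunk seq_len with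
    | none => exact ih accA accB hperm hpw
    | some index =>
      obtain ⟨h1, h2⟩ := step_inv index accA accB hperm hpw
      exact ih _ _ h1 h2

-- ===== VERDICT (by name: the statement is the Claim_ definition above) =====
theorem resolve_token_positions_spec : Claim_equal_resolve_token_positions := by
  intro token_positions seq_len _ _
  unfold Spec_resolve_token_positions resolve_token_positions resolve_token_positions_alt
  by_cases hall : PySem.Str.lower (PySem.Str.strip token_positions) = "all"
  · rw [if_pos hall, if_pos hall]
  · rw [if_neg hall, if_neg hall]
    by_cases hlast : PySem.Str.lower (PySem.Str.strip token_positions) = "last"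
    · rw [if_pos hlast, if_pos hlast]
    · rw [if_neg hlast, if_neg hlast]
      obtain ⟨h1, h2⟩ := loop_inv seq_len
        ((PySem.Str.split? (PySem.Str.lower (PySem.Str.strip token_positions)) ",").getD []) [] []
        (List.Perm.refl []) (List.Pairwise.nil)
      exact PySem.List.sorted_eq_of_perm_of_pairwise_lt _ _ _ h1 h2
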